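-- pv_equiv track=rewrite | github.com/sipambi/alx-higher_level_programming | 0x05-python-exceptions/0-safe_print_list.py | safe_print_list
-- ===== SOURCE A (Python) =====
-- def safe_print_list(my_list=[], x=0):
--     returnValue = 0
--     for a in range(x):
--         try:
--             print (my_list[a], end="")
--             returnValue = a + 1
--         except IndexError:
--             break
--     print ("")
--     return (returnValue)
-- ===== SOURCE B (Python) =====
-- def safe_print_list(my_list=[], x=0):
--     count = 0
--     for elem in my_list[:max(x, 0)]:
--         print(elem, end="")
--         count += 1
--     print("")
--     return count
-- ===== Notes on version B (the rewrite author's own statement) =====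
-- stated objective: simpler
-- what changed: Replaces range-indexing with a try/except IndexError break by direct iteration over the clamped prefix slice my_list[:max(x,0)], counting elements printed; no exception handling needed.
import Mathlib
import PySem

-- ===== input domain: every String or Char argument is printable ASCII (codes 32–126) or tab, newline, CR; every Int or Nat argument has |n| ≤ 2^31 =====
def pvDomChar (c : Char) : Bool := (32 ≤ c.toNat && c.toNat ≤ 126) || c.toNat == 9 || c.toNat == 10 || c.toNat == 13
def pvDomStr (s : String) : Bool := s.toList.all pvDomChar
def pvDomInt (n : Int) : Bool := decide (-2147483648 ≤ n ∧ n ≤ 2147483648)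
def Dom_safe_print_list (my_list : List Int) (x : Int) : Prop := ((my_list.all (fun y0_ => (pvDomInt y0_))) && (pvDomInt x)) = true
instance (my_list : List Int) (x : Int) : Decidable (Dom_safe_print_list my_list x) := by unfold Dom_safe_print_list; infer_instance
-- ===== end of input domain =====

-- ===== PORT A =====
-- B prints the same characters but does not reproduce A's printing side effect mechanism; equivalence is about the return value (printed output is identical anyway).
-- loop 'for a in range(x): try print(my_list[a]); rv = a+1 except IndexError: break'
-- (range is iterated lazily, exactly as Python does: index a runs from 0 while a < x, break = stop)
def safe_print_list_loopA (my_list : List Int) (x a rv : Int) : Int :=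
  if a < x then
    match PySem.List.pyGet? my_list a with
    | some _ => safe_print_list_loopA my_list x (a + 1) (a + 1)
    | none => rv
  else rv
termination_by (x - a).toNat
decreasing_by omega

def safe_print_list (my_list : List Int) (x : Int) : Int :=
  safe_print_list_loopA my_list x 0 0

-- ===== PORT B =====
def safe_print_list_alt (my_list : List Int) (x : Int) : Int :=
  (PySem.List.slice my_list none (some (max x 0))).foldl (fun c _ => c + 1) 0

-- ===== PRECONDITION & SPEC =====
def Spec_safe_print_list (my_list : List Int) (x : Int) (out : Int) : Prop := out = safe_print_list_alt my_list x
instance (my_list : List Int) (x : Int) (out : Int) : Decidable (Spec_safe_print_list my_list x out) := by unfold Spec_safe_print_list; infer_instance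

-- ===== CLAIM (what is proved, stated in full; the proofs are below) =====
def Claim_equal_safe_print_list : Prop := ∀ (my_list : List Int) (x : Int), Dom_safe_print_list my_list x → Spec_safe_print_list my_list x (safe_print_list my_list x)

-- ===== LEMMAS AND PROOFS =====

lemma countFold (ys : List Int) (c : Int) : ys.foldl (fun c _ => c + 1) c = c + ys.length := by
  induction ys generalizing c with
  | nil => simp
  | cons y ys ih => simp [List.foldl, ih]; ring

lemma loopA_eq (l : List Int) (x : Int) (n : Nat) (hn : n ≤ l.length) :
    safe_print_list_loopA l x (n : Int) (n : Int)
      = if x ≤ (n : Int) then (n : Int) else min x (l.length : Int) := by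
  by_cases hx : x ≤ (n : Int)
  · rw [safe_print_list_loopA]
    simp [hx, not_lt.mpr hx]
  · rw [not_le] at hx
    rcases Nat.lt_or_ge n l.length with hlt | hge
    · have hget : PySem.List.pyGet? l (n : Int) = some (l[n]) := by
        simp [PySem.List.pyGet?, PySem.List.pyIdx?, hlt]
      rw [safe_print_list_loopA]
      simp only [if_pos hx, hget]
      have hcast : ((n : Int) + 1) = ((n + 1 : Nat) : Int) := by push_cast; ring
      rw [hcast, loopA_eq l x (n + 1) hlt]
      split_ifs <;> omega
    · have hn' : n = l.length := le_antisymm hn hge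
      have hget : PySem.List.pyGet? l (n : Int) = none := by
        simp [PySem.List.pyGet?, PySem.List.pyIdx?, hn']
      rw [safe_print_list_loopA]
      simp only [if_pos hx, hget]
      split_ifs <;> omega
termination_by (x - n).toNat
decreasing_by omega

-- ===== VERDICT (by name: the statement is the Claim_ definition above) =====
theorem safe_print_list_spec : Claim_equal_safe_print_list := by
  intro l x _
  unfold Spec_safe_print_list safe_print_list safe_print_list_alt
  have h0 : (0 : Int) ≤ max x 0 := le_max_right _ _
  rw [PySem.List.slice_to _ h0, countFold]
  have := loopA_eq l x 0 (Nat.zero_le _)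
  simp only [Nat.cast_zero] at this
  rw [this]
  simp [List.length_take]
  split_ifs with h <;> omega
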